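-- pv_equiv track=rewrite | github.com/Dark-Clown-EMP/data-science-group-project | get the data/get_regiongsp.py | _pick_csv_resource
-- ===== SOURCE A (Python) =====
-- from typing import Dict, List, Optional
--
-- def _resource_download_url(resource: Dict) -> Optional[str]:
--     return resource.get("url") or resource.get("path")
--
-- def _pick_csv_resource(resources: List[Dict], resource_name: str) -> Dict:
--     for r in resources:
--         name = (r.get("name") or "").lower()
--         if name == resource_name.lower():
--             return r
--     for r in resources:
--         fmt = (r.get("format") or "").lower()
--         url = (_resource_download_url(r) or "").lower()
--         name = (r.get("name") or "").lower()
--         if fmt == "csv" or url.endswith(".csv") or ".csv" in url or "csv" in name: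
--             return r
--     raise RuntimeError("No CSV resource found for GSP info dataset.")
-- ===== SOURCE B (Python) =====
-- def _is_csv(r):
--     name = (r.get("name") or "").lower()
--     url = (r.get("url") or r.get("path") or "").lower()
--     return (r.get("format") or "").lower() == "csv" or ".csv" in url or "csv" in name
--
--
-- def _rank(r, target):
--     if (r.get("name") or "").lower() == target:
--         return 0
--     if _is_csv(r):
--         return 1
--     return 2
--
--
-- def _pick_csv_resource(resources, resource_name):
--     target = resource_name.lower()
--     ranked = [(_rank(r, target), r) for r in resources]
--     candidates = [p for p in ranked if p[0] < 2]
--     if candidates: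
--         return min(candidates, key=lambda p: p[0])[1]
--     raise RuntimeError("No CSV resource found for GSP info dataset.")
-- ===== Notes on version B (the rewrite author's own statement) =====
-- stated objective: alternative
-- what changed: Replaces A's two sequential scan-and-return loops by a rank-and-select scheme: every resource gets a priority (0 = name match, 1 = CSV match, 2 = neither), non-matching resources are filtered out, and the stable min by priority picks the result in one selection step.
import Mathlib
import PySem

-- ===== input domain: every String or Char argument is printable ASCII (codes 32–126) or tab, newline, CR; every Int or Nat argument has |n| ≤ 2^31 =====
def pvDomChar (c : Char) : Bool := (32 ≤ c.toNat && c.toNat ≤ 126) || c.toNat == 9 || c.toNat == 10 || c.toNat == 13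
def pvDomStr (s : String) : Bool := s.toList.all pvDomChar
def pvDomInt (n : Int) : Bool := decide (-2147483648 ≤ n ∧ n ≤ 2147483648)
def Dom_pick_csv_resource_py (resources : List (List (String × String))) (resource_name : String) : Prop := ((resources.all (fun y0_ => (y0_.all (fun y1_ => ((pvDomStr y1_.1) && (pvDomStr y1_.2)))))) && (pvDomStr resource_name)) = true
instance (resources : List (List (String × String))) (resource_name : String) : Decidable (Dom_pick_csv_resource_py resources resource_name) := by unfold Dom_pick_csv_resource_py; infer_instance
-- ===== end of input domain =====

-- B replaces A's two scan-and-return loops by a rank-and-select scheme (priority 0 = name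
-- match, 1 = CSV match; filter then stable min by priority); same return value, and B raises
-- RuntimeError exactly where A does (those inputs are outside Pre_).

-- ===== PORT A =====
-- (r.get(k) or "") : missing key and the falsy "" both give ""
def pvGetOr (r : List (String × String)) (k : String) : String :=
  (r.lookup k).getD ""

-- resource.get("url") or resource.get("path")  ("or" treats "" and None as falsy)
def resource_download_url_py (r : List (String × String)) : Option String :=
  match r.lookup "url" with
  | some s => if s = "" then r.lookup "path" else some s
  | none => r.lookup "path"

-- the condition of A's second loop, step for step
def pvCsvTestA (r : List (String × String)) : Bool :=
  let fmt := PySem.Str.lower (pvGetOr r "format")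
  let url := PySem.Str.lower ((resource_download_url_py r).getD "")
  let name := PySem.Str.lower (pvGetOr r "name")
  fmt == "csv" || PySem.Str.endswith url ".csv" || PySem.Str.isIn ".csv" url || PySem.Str.isIn "csv" name

-- first loop of A: first resource whose lowered name equals resource_name.lower()
def pickLoop1 (resources : List (List (String × String))) (resource_name : String) : Option (List (String × String)) :=
  match resources with
  | [] => none
  | r :: rest =>
    if PySem.Str.lower (pvGetOr r "name") == PySem.Str.lower resource_name then some r
    else pickLoop1 rest resource_name

-- second loop of A: first resource passing the CSV test
def pickLoop2 (resources : List (List (String × String))) : Option (List (String × String)) :=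
  match resources with
  | [] => none
  | r :: rest => if pvCsvTestA r then some r else pickLoop2 rest

def pick_csv_resource_py (resources : List (List (String × String))) (resource_name : String) : List (String × String) :=
  match pickLoop1 resources resource_name with
  | some r => r
  | none =>
    match pickLoop2 resources with
    | some r => r
    | none => []   -- raise RuntimeError: excluded by Pre_

-- ===== PORT B =====
-- B's _is_csv (the redundant endswith('.csv') of A is dropped: subsumed by '.csv' in url)
def pvIsCsvB (r : List (String × String)) : Bool :=
  let name := PySem.Str.lower (pvGetOr r "name")
  let url := PySem.Str.lower ((resource_download_url_py r).getD "")
  PySem.Str.lower (pvGetOr r "format") == "csv" || PySem.Str.isIn ".csv" url || PySem.Str.isIn "csv" name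

-- B's _rank: priority of a resource
def pvRankB (r : List (String × String)) (target : String) : Nat :=
  if PySem.Str.lower (pvGetOr r "name") == target then 0
  else if pvIsCsvB r then 1
  else 2

def pick_csv_resource_py_alt (resources : List (List (String × String))) (resource_name : String) : List (String × String) :=
  let target := PySem.Str.lower resource_name
  let ranked := resources.map (fun r => (pvRankB r target, r))
  let candidates := ranked.filter (fun p => p.1 < 2)
  match PySem.List.min? candidates (fun p => p.1) with
  | some p => p.2
  | none => []   -- raise RuntimeError: excluded by Pre_

-- ===== PRECONDITION & SPEC =====
-- Pre_ holds exactly when some resource matches the name or the CSV test — i.e. when A returns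
-- instead of raising RuntimeError (B raises on the same inputs).
def Pre_pick_csv_resource_py (resources : List (List (String × String))) (resource_name : String) : Prop :=
  ∃ r ∈ resources, PySem.Str.lower (pvGetOr r "name") = PySem.Str.lower resource_name ∨ pvCsvTestA r = true

instance (resources : List (List (String × String))) (resource_name : String) : Decidable (Pre_pick_csv_resource_py resources resource_name) := by
  unfold Pre_pick_csv_resource_py; infer_instance

def pvWitness_pick_csv_resource_py : (List (List (String × String))) × String :=
  ([[("format", "csv")], [("name", "gsp")]], "gsp")

def Spec_pick_csv_resource_py (resources : List (List (String × String))) (resource_name : String) (out : List (String × String)) : Prop := out = pick_csv_resource_py_alt resources resource_name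
instance (resources : List (List (String × String))) (resource_name : String) (out : List (String × String)) : Decidable (Spec_pick_csv_resource_py resources resource_name out) := by unfold Spec_pick_csv_resource_py; infer_instance

-- ===== CLAIM =====
def Claim_equal_pick_csv_resource_py : Prop := ∀ (resources : List (List (String × String))) (resource_name : String), Dom_pick_csv_resource_py resources resource_name → Pre_pick_csv_resource_py resources resource_name → Spec_pick_csv_resource_py resources resource_name (pick_csv_resource_py resources resource_name)

-- ===== LEMMAS AND PROOFS =====
-- endswith(".csv") implies ".csv" in url, so A's CSV test and B's _is_csv coincide
lemma ends_imp_isIn (s p : List Char) (h : PySem.Chars.endswith s p = true) :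
    PySem.Chars.isIn p s = true := by
  rw [PySem.Chars.isIn_iff_infix]
  exact ((PySem.Chars.endswith_iff s p).mp h).isInfix

lemma csvTest_eq (r : List (String × String)) : pvIsCsvB r = pvCsvTestA r := by
  unfold pvCsvTestA pvIsCsvB
  by_cases h : PySem.Chars.endswith
      (PySem.Chars.lower ((resource_download_url_py r).getD "").toList) ['.', 'c', 's', 'v'] = true
  · simp [h, ends_imp_isIn _ _ h]
  · simp [eq_false_of_ne_true h]

-- min? over a cons pair keeps the better of the first two elements (ties to the earlier one)
lemma min?_cons_cons {α : Type} (key : α → Nat) (a b : α) (l : List α) :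
    PySem.List.min? (a :: b :: l) key =
      PySem.List.min? ((if key b < key a then b else a) :: l) key := by
  by_cases h : key b < key a <;> simp [PySem.List.min?, List.foldl, h]

-- a leading element of key 0 wins outright
lemma min?_keep0 {α : Type} (key : α → Nat) (cs : List α) (m : α) (hm : key m = 0) :
    PySem.List.min? (m :: cs) key = some m := by
  induction cs with
  | nil => rfl
  | cons x t ih => rw [min?_cons_cons, hm]; simp; exact ih

-- with a leading element of key 1 and tail keys in {0,1}: first key-0 element, else the head
lemma min?_acc1 {α : Type} (key : α → Nat) (cs : List α) (m : α) (hm : key m = 1)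
    (hk : ∀ p ∈ cs, key p = 0 ∨ key p = 1) :
    PySem.List.min? (m :: cs) key =
      (match cs.find? (fun p => key p == 0) with
       | some p => some p
       | none => some m) := by
  induction cs with
  | nil => rfl
  | cons x t ih =>
    rw [min?_cons_cons, hm]
    rcases hk x (List.mem_cons_self) with h0 | h1
    · rw [if_pos (by omega), min?_keep0 key t x h0]
      simp [List.find?, h0]
    · rw [if_neg (by omega), ih (fun p hp => hk p (List.mem_cons_of_mem _ hp))]
      simp [List.find?, h1]

-- stable min over keys in {0,1}: first key-0 element if any, else the head
lemma min01 {α : Type} (key : α → Nat) (cs : List α)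
    (hk : ∀ p ∈ cs, key p = 0 ∨ key p = 1) :
    PySem.List.min? cs key =
      (match cs.find? (fun p => key p == 0) with
       | some p => some p
       | none => cs.head?) := by
  cases cs with
  | nil => rfl
  | cons x t =>
    rcases hk x (List.mem_cons_self) with h0 | h1
    · rw [min?_keep0 key t x h0]
      simp [List.find?, h0]
    · rw [min?_acc1 key t x h1 (fun p hp => hk p (List.mem_cons_of_mem _ hp))]
      simp [List.find?, h1]

-- every candidate's key is 0 or 1 (ranks are in {0,1,2}; the filter keeps < 2)
lemma candidates_keys (l : List (List (String × String))) (target : String) :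
    ∀ p ∈ (l.map (fun r => (pvRankB r target, r))).filter (fun p => p.1 < 2),
      p.1 = 0 ∨ p.1 = 1 := by
  intro p hp
  have h2 := (List.mem_filter.mp hp).2
  simp at h2
  omega

-- if A's first loop finds r, the first key-0 candidate is (0, r)
lemma find0_of_loop1 (l : List (List (String × String))) (name : String) (r : List (String × String))
    (h : pickLoop1 l name = some r) :
    ((l.map (fun s => (pvRankB s (PySem.Str.lower name), s))).filter (fun p => p.1 < 2)).find?
      (fun p => p.1 == 0) = some (0, r) := by
  induction l with
  | nil => simp [pickLoop1] at h
  | cons x t ih =>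
    by_cases hx : PySem.Str.lower (pvGetOr x "name") = PySem.Str.lower name
    · rw [pickLoop1] at h
      rw [if_pos (by simpa using hx)] at h
      cases h
      have hr : pvRankB r (PySem.Str.lower name) = 0 := by simp [pvRankB, hx]
      simp [List.map_cons, hr]
    · rw [pickLoop1] at h
      rw [if_neg (by simpa using hx)] at h
      by_cases hc : pvIsCsvB x = true
      · have hr : pvRankB x (PySem.Str.lower name) = 1 := by simp [pvRankB, hx, hc]
        rw [List.map_cons, List.filter_cons]
        simp only [hr]
        rw [if_pos (by decide), List.find?_cons_of_neg (by simp)]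
        exact ih h
      · have hr : pvRankB x (PySem.Str.lower name) = 2 := by simp [pvRankB, hx, hc]
        rw [List.map_cons, List.filter_cons]
        simp only [hr]
        rw [if_neg (by decide)]
        exact ih h

-- if A's first loop fails, the candidates are exactly the CSV hits, each with key 1
lemma cands_of_loop1_none (l : List (List (String × String))) (name : String)
    (h : pickLoop1 l name = none) :
    (l.map (fun s => (pvRankB s (PySem.Str.lower name), s))).filter (fun p => p.1 < 2) =
      (l.filter pvCsvTestA).map (fun r => (1, r)) := by
  induction l with
  | nil => rfl
  | cons x t ih =>
    rw [pickLoop1] at h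
    by_cases hx : PySem.Str.lower (pvGetOr x "name") = PySem.Str.lower name
    · rw [if_pos (by simpa using hx)] at h; cases h
    · rw [if_neg (by simpa using hx)] at h
      by_cases hc : pvIsCsvB x = true
      · have hca : pvCsvTestA x = true := csvTest_eq x ▸ hc
        have hr : pvRankB x (PySem.Str.lower name) = 1 := by simp [pvRankB, hx, hc]
        rw [List.map_cons, List.filter_cons, List.filter_cons]
        simp only [hr, hca]
        simpa using ih h
      · have hca : pvCsvTestA x = false := by rw [← csvTest_eq]; exact eq_false_of_ne_true hc
        have hr : pvRankB x (PySem.Str.lower name) = 2 := by simp [pvRankB, hx, hc]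
        rw [List.map_cons, List.filter_cons, List.filter_cons]
        simp only [hr, hca]
        simpa using ih h

-- A's second loop is the head of the CSV filter
lemma loop2_eq_head (l : List (List (String × String))) :
    pickLoop2 l = (l.filter pvCsvTestA).head? := by
  induction l with
  | nil => rfl
  | cons x t ih =>
    by_cases hc : pvCsvTestA x = true
    · simp [pickLoop2, List.filter, hc]
    · simp [pickLoop2, List.filter, eq_false_of_ne_true hc, ih]

-- ===== VERDICT =====
theorem pick_csv_resource_py_spec : Claim_equal_pick_csv_resource_py := by
  intro resources resource_name _ _
  unfold Spec_pick_csv_resource_py pick_csv_resource_py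
  have halt : pick_csv_resource_py_alt resources resource_name =
      match PySem.List.min?
        ((resources.map (fun r => (pvRankB r (PySem.Str.lower resource_name), r))).filter
          (fun p => p.1 < 2)) (fun p => p.1) with
      | some p => p.2
      | none => [] := rfl
  have hmin := min01 (fun p : Nat × List (String × String) => p.1)
    ((resources.map (fun r => (pvRankB r (PySem.Str.lower resource_name), r))).filter
      (fun p => p.1 < 2))
    (candidates_keys resources (PySem.Str.lower resource_name))
  rw [halt, hmin]
  cases h1 : pickLoop1 resources resource_name with
  | some r => rw [find0_of_loop1 resources resource_name r h1]
  | none =>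
    rw [cands_of_loop1_none resources resource_name h1, loop2_eq_head]
    have hf : ((resources.filter pvCsvTestA).map
        (fun r => ((1 : Nat), r))).find? (fun p => p.1 == 0) = none := by
      rw [List.find?_eq_none]
      intro p hp
      simp at hp
      obtain ⟨w, -, hp1⟩ := hp
      subst hp1
      simp
    rw [hf]
    cases hh : (resources.filter pvCsvTestA).head? with
    | none =>
      have hnil := List.head?_eq_none_iff.mp hh
      have hfind : List.find? pvCsvTestA resources = none := by
        rw [List.find?_eq_none]
        exact List.filter_eq_nil_iff.mp hnil
      simp [hfind]
    | some r =>
      obtain ⟨t, ht⟩ : ∃ t, resources.filter pvCsvTestA = r :: t := by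
        cases hf2 : resources.filter pvCsvTestA with
        | nil => rw [hf2] at hh; simp at hh
        | cons a t => rw [hf2] at hh; simp at hh; exact ⟨t, by rw [hh]⟩
      simp [ht]
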